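-- pv_equiv track=rewrite | github.com/tengzl33t/iti0102-2020 | PR/pr04_census/popular_names.py | names_by_popularity
-- ===== SOURCE A (Python) =====
-- def names_by_popularity(names_dict: dict) -> str:
--     """Sample text."""
--     if names_dict:
--         sorted_dict = sorted(names_dict, key=names_dict.get, reverse=True)
--         sorted_values = sorted(names_dict.values(), reverse=True)
--
--         rankings = ""
--         index = 0
--         for i in range(len(sorted_dict)):
--             index = index + 1
--             res_string = (
--                 str(index) + ". " + sorted_dict[i] + ": " + str(sorted_values[i]) + "\n"
--             )
--             rankings += res_string
--
--         return rankings
--     else: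
--         return ""
-- ===== SOURCE B (Python) =====
-- def _extract_first_max(items):
--     """Index of the first pair with the maximal value; return it and the rest."""
--     best = 0
--     for j in range(1, len(items)):
--         if items[j][1] > items[best][1]:
--             best = j
--     return items[best], items[:best] + items[best + 1:]
--
--
-- def names_by_popularity(names_dict: dict) -> str:
--     """Sample text."""
--     items = list(names_dict.items())
--     rankings = ""
--     rank = 0
--     while items:
--         pair, items = _extract_first_max(items)
--         rank += 1
--         rankings += str(rank) + ". " + pair[0] + ": " + str(pair[1]) + "\n"
--     return rankings
-- ===== Notes on version B (the rewrite author's own statement) =====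
-- stated objective: alternative
-- what changed: Replaces A's sort-based approach (two independent reverse sorts of keys and values zipped positionally) with sort-free selection: repeatedly scan the remaining pairs for the first maximal value, emit its line, and remove it; stability falls out because the scan keeps the first maximum.
import Mathlib
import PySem

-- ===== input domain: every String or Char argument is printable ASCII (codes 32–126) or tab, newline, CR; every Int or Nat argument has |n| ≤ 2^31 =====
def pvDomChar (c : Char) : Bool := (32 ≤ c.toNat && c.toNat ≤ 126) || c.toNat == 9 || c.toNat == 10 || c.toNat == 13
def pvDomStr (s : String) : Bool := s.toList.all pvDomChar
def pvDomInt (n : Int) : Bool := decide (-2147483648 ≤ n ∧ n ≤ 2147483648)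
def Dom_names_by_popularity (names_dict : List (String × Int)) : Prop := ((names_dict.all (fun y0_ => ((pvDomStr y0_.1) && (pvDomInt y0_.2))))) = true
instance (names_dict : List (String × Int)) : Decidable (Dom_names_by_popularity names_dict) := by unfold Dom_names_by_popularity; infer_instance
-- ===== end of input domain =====

-- B replaces A's sort-based approach (two independent reverse sorts indexed in parallel) with
-- sort-free selection: repeatedly extract the first pair of maximal value and emit its line.

-- ===== PORT A =====
-- The Python argument is a dict: build it from the association list (duplicate keys overwrite, as dict() does).
def names_by_popularity (names_dict : List (String × Int)) : String :=
  let d := PySem.Dict.ofList names_dict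
  if d.items ≠ [] then
    -- key=names_dict.get: every k iterated is a key of the dict, so .get(k) is its value (getD is exact here)
    let sorted_dict := PySem.List.sorted d.keys (fun k => d.getD k 0) true
    let sorted_values := PySem.List.sorted d.values (fun v => v) true
    -- for i in range(len(sorted_dict)): state = (rankings, index); i is always in range, so pyGetD's default is never used
    let st := (PySem.List.pyRange 0 (PySem.List.len sorted_dict)).foldl
      (fun (st : String × Int) i =>
        (st.1 ++ (PySem.Int.toStr (st.2 + 1) ++ ". " ++ PySem.List.pyGetD sorted_dict i "" ++ ": "
          ++ PySem.Int.toStr (PySem.List.pyGetD sorted_values i 0) ++ "\n"), st.2 + 1))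
      ("", 0)
    st.1
  else ""

-- ===== PORT B =====
-- _extract_first_max: scan for the index of the first pair with maximal value, return it and the rest
def pvBest (items : List (String × Int)) : Int :=
  (PySem.List.pyRange 1 (PySem.List.len items) 1).foldl
    (fun best j =>
      if (PySem.List.pyGetD items j ("", (0:Int))).2 > (PySem.List.pyGetD items best ("", (0:Int))).2
      then j else best) 0

def pvExtractFirstMax (items : List (String × Int)) : (String × Int) × List (String × Int) :=
  let best := pvBest items
  (PySem.List.pyGetD items best ("", (0:Int)),
   PySem.List.slice items none (some best) ++ PySem.List.slice items (some (best + 1)) none)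

-- the 'while items:' loop; fuel = the initial length (each pass removes one pair)
def pvWhileLoop : Nat → List (String × Int) → Int → String → String
  | 0, _, _, rankings => rankings
  | fuel + 1, items, rank, rankings =>
    if items = [] then rankings
    else
      let pr := pvExtractFirstMax items
      pvWhileLoop fuel pr.2 (rank + 1)
        (rankings ++ (PySem.Int.toStr (rank + 1) ++ ". " ++ pr.1.1 ++ ": " ++ PySem.Int.toStr pr.1.2 ++ "\n"))

def names_by_popularity_alt (names_dict : List (String × Int)) : String :=
  let items := (PySem.Dict.ofList names_dict).items
  pvWhileLoop items.length items 0 ""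

-- ===== PRECONDITION & SPEC =====
def Spec_names_by_popularity (names_dict : List (String × Int)) (out : String) : Prop := out = names_by_popularity_alt names_dict
instance (names_dict : List (String × Int)) (out : String) : Decidable (Spec_names_by_popularity names_dict out) := by unfold Spec_names_by_popularity; infer_instance

-- ===== CLAIM (what is proved, stated in full; the proofs are below) =====
def Claim_equal_names_by_popularity : Prop := ∀ (names_dict : List (String × Int)), Dom_names_by_popularity names_dict → Spec_names_by_popularity names_dict (names_by_popularity names_dict)

-- ===== LEMMAS AND PROOFS =====

-- one formatted ranking line
def pvLine (i : Int) (p : String × Int) : String :=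
  PySem.Int.toStr i ++ ". " ++ p.1 ++ ": " ++ PySem.Int.toStr p.2 ++ "\n"

theorem pv_insertBy_map {α β : Type} (f : α → β) (p : β → β → Bool) (q : α → α → Bool)
    (h : ∀ a b, p (f a) (f b) = q a b) (x : α) (ys : List α) :
    PySem.List.insertBy p (f x) (ys.map f) = (PySem.List.insertBy q x ys).map f := by
  induction ys with
  | nil => rfl
  | cons y t ih =>
    simp only [List.map, PySem.List.insertBy, h]
    split <;> simp [ih]

theorem pv_foldl_insertBy_map {α β : Type} (f : α → β) (p : β → β → Bool) (q : α → α → Bool)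
    (h : ∀ a b, p (f a) (f b) = q a b) (xs : List α) :
    ∀ acc : List α,
      (xs.map f).foldl (fun a x => PySem.List.insertBy p x a) (acc.map f)
        = (xs.foldl (fun a x => PySem.List.insertBy q x a) acc).map f := by
  induction xs with
  | nil => intro acc; rfl
  | cons x t ih =>
    intro acc
    simp only [List.map, List.foldl]
    rw [pv_insertBy_map f p q h x acc]
    exact ih (PySem.List.insertBy q x acc)

theorem pv_sorted_map_rev {α β κ : Type} [LT κ] [DecidableLT κ] (f : α → β) (key : β → κ) (xs : List α) :
    PySem.List.sorted (xs.map f) key true = (PySem.List.sorted xs (fun x => key (f x)) true).map f := by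
  rw [PySem.List.sorted_rev_eq_foldl_insertBy, PySem.List.sorted_rev_eq_foldl_insertBy]
  have := pv_foldl_insertBy_map f (fun a b => decide (key b < key a))
      (fun a b => decide (key (f b) < key (f a))) (fun _ _ => rfl) xs []
  simpa using this

theorem pv_insertBy_congr {α : Type} (p q : α → α → Bool) (x : α) (ys : List α)
    (h : ∀ y ∈ ys, p x y = q x y) :
    PySem.List.insertBy p x ys = PySem.List.insertBy q x ys := by
  induction ys with
  | nil => rfl
  | cons y t ih =>
    simp only [PySem.List.insertBy, h y (by simp)]
    split <;> simp [ih (fun z hz => h z (by simp [hz]))]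

theorem pv_foldl_insertBy_congr {α κ : Type} [LT κ] [DecidableLT κ] (k1 k2 : α → κ) (xs : List α)
    (h : ∀ a ∈ xs, k1 a = k2 a) :
    ∀ acc : List α, (∀ a ∈ acc, k1 a = k2 a) →
      xs.foldl (fun a x => PySem.List.insertBy (fun a b => decide (k1 b < k1 a)) x a) acc
        = xs.foldl (fun a x => PySem.List.insertBy (fun a b => decide (k2 b < k2 a)) x a) acc := by
  induction xs with
  | nil => intro _ _; rfl
  | cons x t ih =>
    intro acc hacc
    simp only [List.foldl]
    rw [pv_insertBy_congr _ (fun a b => decide (k2 b < k2 a)) x acc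
      (fun y hy => by rw [h x (by simp), hacc y hy])]
    exact ih (fun a ha => h a (by simp [ha])) _
      (fun a ha => by rcases (PySem.List.mem_insertBy _ _ _ _).1 ha with rfl | ha
                      · exact h a (by simp)
                      · exact hacc a ha)

theorem pv_sorted_congr_rev {α κ : Type} [LT κ] [DecidableLT κ] (k1 k2 : α → κ) (xs : List α)
    (h : ∀ a ∈ xs, k1 a = k2 a) :
    PySem.List.sorted xs k1 true = PySem.List.sorted xs k2 true := by
  rw [PySem.List.sorted_rev_eq_foldl_insertBy, PySem.List.sorted_rev_eq_foldl_insertBy]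
  exact pv_foldl_insertBy_congr k1 k2 xs h [] (by simp)

theorem pv_flatten_intersperse_nil {α : Type} (l : List (List α)) :
    (List.intersperse ([] : List α) l).flatten = l.flatten := by
  induction l with
  | nil => rfl
  | cons a t ih =>
    cases t with
    | nil => rfl
    | cons b u => simpa [List.intersperse] using ih

theorem pv_join_nil : PySem.Str.join "" ([] : List String) = "" := rfl

theorem pv_join_cons (a : String) (l : List String) :
    PySem.Str.join "" (a :: l) = a ++ PySem.Str.join "" l := by
  simp [PySem.Str.join, PySem.Chars.join, List.intercalate, pv_flatten_intersperse_nil]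

theorem pv_foldA (s : List (String × Int)) :
    ∀ (r : String) (n : Int),
      (s.foldl (fun (st : String × Int) kv => (st.1 ++ pvLine (st.2 + 1) kv, st.2 + 1)) (r, n)).1
        = r ++ PySem.Str.join "" ((PySem.List.enumerate s (n + 1)).map (fun p => pvLine p.1 p.2)) := by
  induction s with
  | nil => intro r n; simp [pv_join_nil, PySem.List.enumerate]
  | cons x t ih =>
    intro r n
    simp only [List.foldl, PySem.List.enumerate, List.map, pv_join_cons]
    rw [ih (r ++ pvLine (n + 1) x) (n + 1), String.append_assoc]

-- A as "join of the formatted lines of the items sorted by value, descending"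
theorem pv_A_eq (names_dict : List (String × Int)) :
    names_by_popularity names_dict
      = PySem.Str.join ""
          ((PySem.List.enumerate
              (PySem.List.sorted (PySem.Dict.ofList names_dict).items (fun kv => kv.2) true) 1).map
            (fun p => pvLine p.1 p.2)) := by
  unfold names_by_popularity
  set d := PySem.Dict.ofList names_dict with hd
  by_cases h : d.items = []
  · simp [h, PySem.List.sorted, pv_join_nil]
  · simp only [h, if_pos, ne_eq, not_false_eq_true]
    set s := PySem.List.sorted d.items (fun kv => kv.2) true with hs
    have hnd : d.keys.Nodup := PySem.Dict.nodup_keys_ofList names_dict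
    -- keys sorted by .get  =  fst of items sorted by value
    have hk : PySem.List.sorted d.keys (fun k => d.getD k 0) true = s.map Prod.fst := by
      have : d.keys = d.items.map Prod.fst := rfl
      rw [this, pv_sorted_map_rev]
      rw [pv_sorted_congr_rev (fun x : String × Int => d.getD x.1 0) (fun kv => kv.2) d.items
        (fun p hp => PySem.Dict.getD_of_mem_items d (by exact hp) hnd 0)]
    -- values sorted  =  snd of items sorted by value
    have hv : PySem.List.sorted d.values (fun v => v) true = s.map Prod.snd := by
      have : d.values = d.items.map Prod.snd := rfl
      rw [this, pv_sorted_map_rev]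
    have hget1 : ∀ i : Int, PySem.List.pyGetD (s.map Prod.fst) i "" = (PySem.List.pyGetD s i ("", (0:Int))).1 :=
      fun i => PySem.List.pyGetD_map Prod.fst s i ("", 0)
    have hget2 : ∀ i : Int, PySem.List.pyGetD (s.map Prod.snd) i 0 = (PySem.List.pyGetD s i ("", (0:Int))).2 :=
      fun i => PySem.List.pyGetD_map Prod.snd s i ("", 0)
    have hlen : PySem.List.len (s.map Prod.fst) = PySem.List.len s := by
      simp [PySem.List.len]
    rw [hk, hv]
    simp only [hget1, hget2, hlen]
    have h1 : (PySem.List.pyRange 0 (PySem.List.len s)).foldl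
        (fun (st : String × Int) i =>
          (st.1 ++ (PySem.Int.toStr (st.2 + 1) ++ ". " ++ (PySem.List.pyGetD s i ("", (0:Int))).1 ++ ": "
            ++ PySem.Int.toStr (PySem.List.pyGetD s i ("", (0:Int))).2 ++ "\n"), st.2 + 1)) ("", 0)
        = s.foldl (fun (st : String × Int) kv => (st.1 ++ pvLine (st.2 + 1) kv, st.2 + 1)) ("", 0) := by
      have := PySem.List.foldl_pyRange_pyGetD s ("", (0:Int))
        (fun (st : String × Int) kv => (st.1 ++ pvLine (st.2 + 1) kv, st.2 + 1)) ("", (0:Int)) (a := 0) le_rfl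
      simpa [pvLine] using this
    rw [h1, pv_foldA s "" 0]
    norm_num

-- ---- B-side: the selection scan picks the head of the stable descending sort ----

-- the scan's step function (the body of the 'for j in range(1, len(items))' loop)
def pvStep (xs : List (String × Int)) : Int → Int → Int :=
  fun best j =>
    if (PySem.List.pyGetD xs j ("", (0:Int))).2 > (PySem.List.pyGetD xs best ("", (0:Int))).2
    then j else best

theorem pv_pyGetD_append_left (ys : List (String × Int)) (x : String × Int) (i : Int)
    (h0 : 0 ≤ i) (h1 : i < (ys.length : Int)) :
    PySem.List.pyGetD (ys ++ [x]) i ("", (0:Int)) = PySem.List.pyGetD ys i ("", (0:Int)) := by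
  rw [PySem.List.pyGetD_eq_getElem _ _ h0 (by simp; omega),
      PySem.List.pyGetD_eq_getElem _ _ h0 h1]
  exact List.getElem_append_left (by omega)

theorem pv_fold_inv (xs : List (String × Int)) (L : Int) :
    ∀ (r : List Int), (∀ j ∈ r, 0 ≤ j ∧ j < L) → ∀ b, 0 ≤ b → b < L →
      0 ≤ r.foldl (pvStep xs) b ∧ r.foldl (pvStep xs) b < L := by
  intro r
  induction r with
  | nil => intro _ b h0 h1; exact ⟨h0, h1⟩
  | cons j t ih =>
    intro hr b h0 h1
    simp only [List.foldl]
    have hj := hr j (by simp)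
    unfold pvStep
    split
    · exact ih (fun a ha => hr a (by simp [ha])) j hj.1 hj.2
    · exact ih (fun a ha => hr a (by simp [ha])) b h0 h1

theorem pv_fold_agree (ys : List (String × Int)) (x : String × Int) :
    ∀ (r : List Int), (∀ j ∈ r, 0 ≤ j ∧ j < (ys.length : Int)) →
      ∀ b, 0 ≤ b → b < (ys.length : Int) →
        r.foldl (pvStep (ys ++ [x])) b = r.foldl (pvStep ys) b := by
  intro r
  induction r with
  | nil => intro _ _ _ _; rfl
  | cons j t ih =>
    intro hr b h0 h1
    have hj := hr j (by simp)
    simp only [List.foldl]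
    have hs : pvStep (ys ++ [x]) b j = pvStep ys b j := by
      unfold pvStep
      rw [pv_pyGetD_append_left ys x j hj.1 hj.2, pv_pyGetD_append_left ys x b h0 h1]
    rw [hs]
    have : 0 ≤ pvStep ys b j ∧ pvStep ys b j < (ys.length : Int) := by
      unfold pvStep; split
      · exact hj
      · exact ⟨h0, h1⟩
    exact ih (fun a ha => hr a (by simp [ha])) _ this.1 this.2

theorem pvBest_eq_fold (items : List (String × Int)) :
    pvBest items = (PySem.List.pyRange 1 (PySem.List.len items) 1).foldl (pvStep items) 0 := rfl

theorem pvBest_range (items : List (String × Int)) (h : items ≠ []) :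
    0 ≤ pvBest items ∧ pvBest items < (items.length : Int) := by
  have hlen : (0:Int) < (items.length : Int) := by
    have : items.length ≠ 0 := fun hh => h (List.eq_nil_of_length_eq_zero hh)
    omega
  rw [pvBest_eq_fold]
  refine pv_fold_inv items (items.length : Int) _ ?_ 0 le_rfl hlen
  intro j hj
  have := PySem.List.mem_pyRange_one.1 hj
  simp [PySem.List.len] at this
  omega

theorem pvBest_snoc (ys : List (String × Int)) (x : String × Int) (h : ys ≠ []) :
    pvBest (ys ++ [x])
      = if (PySem.List.pyGetD ys (pvBest ys) ("", (0:Int))).2 < x.2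
        then (ys.length : Int) else pvBest ys := by
  have hlen : (1:Int) ≤ (ys.length : Int) := by
    have : ys.length ≠ 0 := fun hh => h (List.eq_nil_of_length_eq_zero hh)
    omega
  have hrange : PySem.List.pyRange 1 (PySem.List.len (ys ++ [x])) 1
      = PySem.List.pyRange 1 (PySem.List.len ys) 1 ++ [(ys.length : Int)] := by
    have h1 : PySem.List.len (ys ++ [x]) = (ys.length : Int) + 1 := by
      simp [PySem.List.len]
    have h2 : PySem.List.len ys = (ys.length : Int) := by simp [PySem.List.len]
    rw [h1, PySem.List.pyRange_one_succ_right (by omega), h2]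
  have hmem : ∀ j ∈ PySem.List.pyRange 1 (PySem.List.len ys) 1, 0 ≤ j ∧ j < (ys.length : Int) := by
    intro j hj
    have := PySem.List.mem_pyRange_one.1 hj
    simp [PySem.List.len] at this
    omega
  rw [pvBest_eq_fold, hrange, List.foldl_append,
      pv_fold_agree ys x _ hmem 0 le_rfl (by omega)]
  rw [← pvBest_eq_fold]
  have hb := pvBest_range ys h
  simp only [List.foldl]
  unfold pvStep
  rw [pv_pyGetD_append_left ys x _ hb.1 hb.2,
      PySem.List.pyGetD_eq_getElem _ _ (by omega) (by simp)]
  simp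

theorem pv_extract_snoc (ys : List (String × Int)) (x : String × Int) (h : ys ≠ []) :
    pvExtractFirstMax (ys ++ [x])
      = if (pvExtractFirstMax ys).1.2 < x.2
        then (x, ys)
        else ((pvExtractFirstMax ys).1, (pvExtractFirstMax ys).2 ++ [x]) := by
  have hb := pvBest_range ys h
  have hA : pvExtractFirstMax (ys ++ [x])
      = (PySem.List.pyGetD (ys ++ [x]) (pvBest (ys ++ [x])) ("", (0:Int)),
         PySem.List.slice (ys ++ [x]) none (some (pvBest (ys ++ [x])))
           ++ PySem.List.slice (ys ++ [x]) (some (pvBest (ys ++ [x]) + 1)) none) := rfl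
  have hB : pvExtractFirstMax ys
      = (PySem.List.pyGetD ys (pvBest ys) ("", (0:Int)),
         PySem.List.slice ys none (some (pvBest ys))
           ++ PySem.List.slice ys (some (pvBest ys + 1)) none) := rfl
  rw [hA, hB]
  dsimp only
  rw [pvBest_snoc ys x h]
  split_ifs with hc
  · -- the new pair is the strict maximum: it is extracted, the rest is ys unchanged
    rw [PySem.List.pyGetD_eq_getElem _ _ (by omega) (by simp),
        PySem.List.slice_to _ (by omega), PySem.List.slice_from _ (by omega)]
    have htoNat : Int.toNat ((ys.length : Int) + 1) = ys.length + 1 := by omega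
    have hdrop : List.drop (ys.length + 1) (ys ++ [x]) = [] := by
      apply List.drop_eq_nil_of_le
      simp
    simp [htoNat, hdrop]
  · -- the first maximum is still inside ys
    rw [pv_pyGetD_append_left ys x _ hb.1 hb.2,
        PySem.List.slice_to _ (by omega), PySem.List.slice_from _ (by omega),
        PySem.List.slice_to _ (by omega), PySem.List.slice_from _ (by omega),
        List.take_append_of_le_length (by omega),
        List.drop_append_of_le_length (by omega)]
    simp

theorem pv_sorted_snoc {α κ : Type} [LT κ] [DecidableLT κ] (key : α → κ) (ys : List α) (x : α) :
    PySem.List.sorted (ys ++ [x]) key true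
      = PySem.List.insertBy (fun a b => decide (key b < key a)) x (PySem.List.sorted ys key true) := by
  rw [PySem.List.sorted_rev_eq_foldl_insertBy, PySem.List.sorted_rev_eq_foldl_insertBy,
    List.foldl_append]
  rfl

theorem pv_sorted_extract (xs : List (String × Int)) (h : xs ≠ []) :
    PySem.List.sorted xs (fun kv => kv.2) true
      = (pvExtractFirstMax xs).1
          :: PySem.List.sorted (pvExtractFirstMax xs).2 (fun kv => kv.2) true := by
  induction xs using List.reverseRecOn with
  | nil => exact absurd rfl h
  | append_singleton ys x ih =>
    by_cases hys : ys = []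
    · subst hys
      have he : pvExtractFirstMax ([] ++ [x]) = (x, []) := by
        have h0 : pvBest ([] ++ [x]) = 0 := by
          rw [pvBest_eq_fold]
          have : PySem.List.pyRange 1 (PySem.List.len ([] ++ [x])) 1 = [] :=
            PySem.List.pyRange_one_eq_nil (by simp [PySem.List.len])
          rw [this]
          rfl
        have hA : pvExtractFirstMax ([] ++ [x])
            = (PySem.List.pyGetD ([] ++ [x]) (pvBest ([] ++ [x])) ("", (0:Int)),
               PySem.List.slice ([] ++ [x]) none (some (pvBest ([] ++ [x])))
                 ++ PySem.List.slice ([] ++ [x]) (some (pvBest ([] ++ [x]) + 1)) none) := rfl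
        rw [hA, h0]
        rw [PySem.List.slice_to _ le_rfl, PySem.List.slice_from _ (by omega)]
        simp [PySem.List.pyGetD_zero_cons]
      rw [he]
      rw [PySem.List.sorted_rev_eq_foldl_insertBy, PySem.List.sorted_rev_eq_foldl_insertBy]
      rfl
    · rw [pv_sorted_snoc, ih hys, pv_extract_snoc ys x hys]
      by_cases hc : (pvExtractFirstMax ys).1.2 < x.2
      · rw [if_pos hc]
        rw [ih hys]
        simp only [PySem.List.insertBy]
        rw [if_pos (by simpa using hc)]
      · rw [if_neg hc]
        rw [pv_sorted_snoc]
        simp only [PySem.List.insertBy]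
        rw [if_neg (by simpa using hc)]

theorem pv_extract_length (xs : List (String × Int)) (h : xs ≠ []) :
    (pvExtractFirstMax xs).2.length = xs.length - 1 := by
  have := congrArg List.length (pv_sorted_extract xs h)
  simp [PySem.List.length_sorted] at this
  omega

theorem pv_loop (fuel : Nat) :
    ∀ (xs : List (String × Int)), xs.length ≤ fuel → ∀ (rank : Int) (acc : String),
      pvWhileLoop fuel xs rank acc
        = acc ++ PySem.Str.join ""
            ((PySem.List.enumerate (PySem.List.sorted xs (fun kv => kv.2) true) (rank + 1)).map
              (fun p => pvLine p.1 p.2)) := by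
  induction fuel with
  | zero =>
    intro xs hle rank acc
    have hxs : xs = [] := List.eq_nil_of_length_eq_zero (Nat.le_zero.mp hle)
    subst hxs
    show acc = _
    rw [show PySem.List.sorted ([] : List (String × Int)) (fun kv => kv.2) true = [] from rfl]
    simp [PySem.List.enumerate, pv_join_nil]
  | succ fuel ih =>
    intro xs hle rank acc
    by_cases hxs : xs = []
    · subst hxs
      show acc = _
      rw [show PySem.List.sorted ([] : List (String × Int)) (fun kv => kv.2) true = [] from rfl]
      simp [PySem.List.enumerate, pv_join_nil]
    · have hstep : pvWhileLoop (fuel + 1) xs rank acc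
          = pvWhileLoop fuel (pvExtractFirstMax xs).2 (rank + 1)
              (acc ++ pvLine (rank + 1) (pvExtractFirstMax xs).1) := by
        simp only [pvWhileLoop, if_neg hxs]
        rfl
      rw [hstep, ih _ (by have := pv_extract_length xs hxs
                          have : xs.length ≠ 0 := fun hh => hxs (List.eq_nil_of_length_eq_zero hh)
                          omega) (rank + 1) _]
      rw [pv_sorted_extract xs hxs, PySem.List.enumerate_cons, List.map_cons, pv_join_cons]
      rw [String.append_assoc]

theorem pv_main (names_dict : List (String × Int)) :
    names_by_popularity names_dict = names_by_popularity_alt names_dict := by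
  rw [pv_A_eq]
  show _ = pvWhileLoop _ _ 0 ""
  rw [pv_loop _ _ le_rfl 0 ""]
  simp

-- ===== VERDICT (by name: the statement is the Claim_ definition above) =====
theorem names_by_popularity_spec : Claim_equal_names_by_popularity := by
  intro names_dict _
  unfold Spec_names_by_popularity
  exact pv_main names_dict
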